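-- pv_equiv track=rewrite | github.com/nipponwalk/www | scripts/update_index.py | fallback_tags
-- ===== SOURCE A (Python) =====
-- from typing import List, Tuple
--
-- def fallback_tags(text: str) -> List[str]:
--     words = [w for w in text.replace('\n', ' ').split(' ') if len(w) > 3]
--     seen = []
--     for w in words:
--         if w not in seen:
--             seen.append(w)
--         if len(seen) == 5:
--             break
--     return seen
-- ===== SOURCE B (Python) =====
-- def _first_distinct(ws, k):
--     if k == 0 or not ws:
--         return []
--     w = ws[0]
--     return [w] + _first_distinct([x for x in ws[1:] if x != w], k - 1)
--
-- def fallback_tags(text):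
--     words = [w for w in text.replace('\n', ' ').split(' ') if len(w) > 3]
--     return _first_distinct(words, 5)
-- ===== Notes on version B (the rewrite author's own statement) =====
-- stated objective: alternative
-- what changed: Replaces A's seen-list loop with membership test and early break by a recursive selection: take the head word, filter every later copy of it out of the tail, and recurse with a countdown from 5 — no seen accumulator and no membership lookup exist at all.
import Mathlib
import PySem

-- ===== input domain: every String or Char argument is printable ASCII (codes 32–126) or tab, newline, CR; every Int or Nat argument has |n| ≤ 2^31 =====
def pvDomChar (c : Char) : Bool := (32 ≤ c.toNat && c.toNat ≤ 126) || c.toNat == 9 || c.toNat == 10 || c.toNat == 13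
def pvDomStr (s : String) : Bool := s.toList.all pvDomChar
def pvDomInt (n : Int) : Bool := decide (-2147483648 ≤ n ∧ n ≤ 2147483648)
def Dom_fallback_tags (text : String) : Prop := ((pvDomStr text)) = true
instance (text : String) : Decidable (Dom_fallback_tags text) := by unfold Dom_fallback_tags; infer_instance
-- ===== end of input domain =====

-- B replaces A's seen-list loop (membership test + early break) by a recursive selection:
-- take the head word, filter its later copies out of the tail, recurse counting down from 5 (alternative; same results).

-- ===== PORT A =====
-- the 'for w in words' loop with the 'seen' accumulator and the 'len(seen) == 5: break'
def fbLoopA : List String → List String → List String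
  | seen, [] => seen
  | seen, w :: rest =>
    let seen' := if seen.contains w then seen else seen ++ [w]
    if seen'.length = 5 then seen' else fbLoopA seen' rest

def fallback_tags (text : String) : List String :=
  let words := (((PySem.Str.split? (PySem.Str.replace text "\n" " ") " ").getD []).filter
    (fun w => 3 < PySem.Str.len w))
  fbLoopA [] words

-- ===== PORT B =====
-- _first_distinct: head word, then recurse on the tail with its copies filtered out
def firstDistinct : List String → Nat → List String
  | _, 0 => []
  | [], _ => []
  | w :: rest, k + 1 => w :: firstDistinct (rest.filter (fun x => x ≠ w)) k
termination_by ws _ => ws.length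
decreasing_by
  simpa using le_trans (List.length_filter_le _ _) (le_of_eq (by simp))

def fallback_tags_alt (text : String) : List String :=
  let words := (((PySem.Str.split? (PySem.Str.replace text "\n" " ") " ").getD []).filter
    (fun w => 3 < PySem.Str.len w))
  firstDistinct words 5

-- ===== PRECONDITION & SPEC =====
def Spec_fallback_tags (text : String) (out : List String) : Prop := out = fallback_tags_alt text
instance (text : String) (out : List String) : Decidable (Spec_fallback_tags text out) := by unfold Spec_fallback_tags; infer_instance

-- ===== CLAIM (what is proved, stated in full; the proofs are below) =====
def Claim_equal_fallback_tags : Prop := ∀ (text : String), Dom_fallback_tags text → Spec_fallback_tags text (fallback_tags text)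

-- ===== LEMMAS AND PROOFS =====

-- the running 'seen' list is a prefix of any further Set.update of it
lemma prefix_update (l : List String) : ∀ s : List String, s <+: PySem.Set.update s l := by
  induction l with
  | nil => intro s; simp [PySem.Set.update]
  | cons x t ih =>
    intro s
    have h1 : s <+: PySem.Set.add s x := by
      by_cases h : x ∈ s <;> simp [PySem.Set.add, h]
    exact h1.trans (by simpa [PySem.Set.update] using ih (PySem.Set.add s x))

lemma add_length_le (s : List String) (x : String) :
    (PySem.Set.add s x).length ≤ s.length + 1 := by
  by_cases h : x ∈ s <;> simp [PySem.Set.add, h]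

-- loop invariant: while |seen| < 5, A's loop computes the first 5 of Set.update seen ws
lemma fbLoopA_eq (ws : List String) : ∀ seen : List String, seen.length < 5 →
    fbLoopA seen ws = (PySem.Set.update seen ws).take 5 := by
  induction ws with
  | nil =>
    intro seen h
    simp [fbLoopA, PySem.Set.update, List.take_of_length_le (Nat.le_of_lt h)]
  | cons w rest ih =>
    intro seen h
    have hadd : (if seen.contains w then seen else seen ++ [w]) = PySem.Set.add seen w := by
      by_cases h : w ∈ seen <;> simp [PySem.Set.add, h]
    have hupd : PySem.Set.update seen (w :: rest)
        = PySem.Set.update (PySem.Set.add seen w) rest := rfl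
    rw [fbLoopA, hadd, hupd]
    by_cases h5 : (PySem.Set.add seen w).length = 5
    · obtain ⟨t, ht⟩ := prefix_update rest (PySem.Set.add seen w)
      rw [if_pos h5, ← ht, List.take_append_of_le_length (by omega),
        List.take_of_length_le (Nat.le_of_eq h5)]
    · have hlt : (PySem.Set.add seen w).length < 5 := by
        have := add_length_le seen w; omega
      rw [if_neg h5, ih _ hlt]

-- updating past elements already in 'seen' is a no-op: copies of a seen word can be filtered away
lemma update_filter_mem (w : String) : ∀ (l s : List String), w ∈ s →
    PySem.Set.update s l = PySem.Set.update s (l.filter (fun x => x ≠ w)) := by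
  intro l
  induction l with
  | nil => intro s _; rfl
  | cons x t ih =>
    intro s hw
    by_cases hx : x = w
    · subst hx
      have ha : PySem.Set.add s x = s := by simp [PySem.Set.add, hw]
      rw [show (x :: t).filter (fun y => y ≠ x) = t.filter (fun y => y ≠ x) from by simp]
      show PySem.Set.update (PySem.Set.add s x) t = _
      rw [ha]; exact ih s hw
    · have hw' : w ∈ PySem.Set.add s x := by
        by_cases h : x ∈ s <;> simp [PySem.Set.add, h, hw]
      rw [show (x :: t).filter (fun y => y ≠ w) = x :: t.filter (fun y => y ≠ w) from by
        simp [hx]]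
      show PySem.Set.update (PySem.Set.add s x) t
          = PySem.Set.update (PySem.Set.add s x) (t.filter (fun y => y ≠ w))
      exact ih _ hw'

-- a fresh head word commutes out of Set.update when no later element equals it
lemma update_cons_out (w : String) : ∀ (l s : List String), (∀ x ∈ l, x ≠ w) →
    PySem.Set.update (w :: s) l = w :: PySem.Set.update s l := by
  intro l
  induction l with
  | nil => intro s _; rfl
  | cons x t ih =>
    intro s h
    have hx : x ≠ w := h x (by simp)
    have heq : PySem.Set.add (w :: s) x = w :: PySem.Set.add s x := by
      by_cases hm : x ∈ s <;> simp [PySem.Set.add, hm, hx]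
    show PySem.Set.update (PySem.Set.add (w :: s) x) t = _
    rw [heq]
    exact ih (PySem.Set.add s x) (fun y hy => h y (by simp [hy]))

-- ordered dedup unfolds as B's selection step
lemma ofList_cons (w : String) (rest : List String) :
    PySem.Set.ofList (w :: rest) = w :: PySem.Set.ofList (rest.filter (fun x => x ≠ w)) := by
  have h1 : PySem.Set.ofList (w :: rest) = PySem.Set.update [w] rest := by
    simp [PySem.Set.ofList_eq_foldl, PySem.Set.update, PySem.Set.add]
  rw [h1, update_filter_mem w rest [w] (by simp),
    update_cons_out w _ [] (by intro x hx; simpa using (List.mem_filter.mp hx).2)]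
  rfl

-- B's recursion computes the first k of the ordered dedup
lemma firstDistinct_eq (ws : List String) (k : Nat) :
    firstDistinct ws k = (PySem.Set.ofList ws).take k := by
  induction hn : ws.length using Nat.strong_induction_on generalizing ws k with
  | _ n ih =>
    match ws, k with
    | _, 0 => simp [firstDistinct]
    | [], _ + 1 => simp [firstDistinct, PySem.Set.ofList]
    | w :: rest, k + 1 =>
      rw [firstDistinct, ofList_cons, List.take_succ_cons,
        ih (rest.filter (fun x => x ≠ w)).length
          (by subst hn; simpa using Nat.lt_succ_of_le (List.length_filter_le _ _)) _ _ rfl]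

-- ===== VERDICT (by name: the statement is the Claim_ definition above) =====
theorem fallback_tags_spec : Claim_equal_fallback_tags := by
  intro text _
  unfold Spec_fallback_tags fallback_tags fallback_tags_alt
  rw [fbLoopA_eq _ [] (by simp), firstDistinct_eq]
  rfl
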